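-- pv_equiv track=rewrite | github.com/pypi-data/pypi-mirror-357 | packages/fts-mcp/fts_mcp-0.0.6-py3-none-any.whl/full_text_search/ingest/common.py | coalesce_small_chunks
-- ===== SOURCE A (Python) =====
-- def coalesce_small_chunks(chunks: list[str], min_size: int = 125) -> list[str]:
--     """
--     Merge any chunk shorter than *min_size* into the *following* chunk.
--     (If it’s the last chunk, it’s left as-is.)
--     """
--     if not chunks:
--         return []
--
--     merged: list[str] = []
--     i = 0
--     while i < len(chunks):
--         # Start with current chunk
--         accumulated = chunks[i]
--         j = i + 1
--
--         # Keep merging following chunks while current is too small and there are more chunks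
--         while len(accumulated) < min_size and j < len(chunks):
--             accumulated = accumulated.rstrip() + "\n\n" + chunks[j].lstrip()
--             j += 1
--
--         merged.append(accumulated)
--         i = j  # Move to next unprocessed chunk
--
--     return merged
-- ===== SOURCE B (Python) =====
-- def coalesce_small_chunks(chunks: list[str], min_size: int = 125) -> list[str]:
--     """
--     Merge any chunk shorter than *min_size* into the *following* chunk.
--     (If it's the last chunk, it's left as-is.)
--     """
--     merged: list[str] = []
--     current = None
--     for chunk in chunks:
--         if current is None:
--             current = chunk
--         else:
--             current = current.rstrip() + "\n\n" + chunk.lstrip()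
--         if len(current) >= min_size:
--             merged.append(current)
--             current = None
--     if current is not None:
--         merged.append(current)
--     return merged
-- ===== Notes on version B (the rewrite author's own statement) =====
-- stated objective: simpler
-- what changed: Replaced A's nested while-loops with index jumping (i = j) by a single for-loop state machine that keeps one 'current' buffer and flushes it whenever it reaches min_size.
import Mathlib
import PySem

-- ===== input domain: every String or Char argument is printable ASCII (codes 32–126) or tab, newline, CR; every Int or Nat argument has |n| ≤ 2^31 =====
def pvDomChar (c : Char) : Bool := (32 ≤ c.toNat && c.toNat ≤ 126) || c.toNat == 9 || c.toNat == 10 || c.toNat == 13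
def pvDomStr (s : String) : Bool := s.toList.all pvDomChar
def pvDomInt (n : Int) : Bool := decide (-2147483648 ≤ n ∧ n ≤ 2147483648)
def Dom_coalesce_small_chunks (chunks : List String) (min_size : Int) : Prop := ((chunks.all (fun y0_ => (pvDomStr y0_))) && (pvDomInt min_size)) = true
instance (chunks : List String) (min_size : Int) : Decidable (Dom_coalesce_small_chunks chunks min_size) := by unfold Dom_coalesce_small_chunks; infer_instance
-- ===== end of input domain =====

-- B replaces A's nested while-loops with index jumping by a single-pass
-- flush-on-threshold state machine over the list (objective: simpler).


-- ===== PORT A =====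
-- inner while: keep merging following chunks while accumulated is too small
def pvInnerA (chunks : List String) (min_size : Int) (acc : String) (j : Nat) : String × Nat :=
  if h : PySem.Str.len acc < min_size ∧ j < chunks.length then
    pvInnerA chunks min_size
      (PySem.Str.rstrip acc ++ "\n\n" ++ PySem.Str.lstrip (chunks[j]'h.2)) (j + 1)
  else (acc, j)
termination_by chunks.length - j

-- termination fact for the outer loop: the inner while never moves j backwards
theorem pvInnerA_le (chunks : List String) (min_size : Int) :
    ∀ (acc : String) (j : Nat), j ≤ (pvInnerA chunks min_size acc j).2 := by
  intro acc j
  induction acc, j using pvInnerA.induct chunks min_size with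
  | case1 acc j h ih => rw [pvInnerA, dif_pos h]; omega
  | case2 acc j h => rw [pvInnerA, dif_neg h]

-- outer while over index i
def pvOuterA (chunks : List String) (min_size : Int) (i : Nat) (merged : List String) : List String :=
  if h : i < chunks.length then
    let p := pvInnerA chunks min_size (chunks[i]'h) (i + 1)
    pvOuterA chunks min_size p.2 (merged ++ [p.1])
  else merged
termination_by chunks.length - i
decreasing_by
  have := pvInnerA_le chunks min_size (chunks[i]'h) (i + 1)
  omega

def coalesce_small_chunks (chunks : List String) (min_size : Int) : List String :=
  if chunks = [] then [] else pvOuterA chunks min_size 0 []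

-- ===== PORT B =====
def pvStepB (min_size : Int) (st : List String × Option String) (chunk : String) :
    List String × Option String :=
  let current : String :=
    match st.2 with
    | none => chunk
    | some c => PySem.Str.rstrip c ++ "\n\n" ++ PySem.Str.lstrip chunk
  if min_size ≤ PySem.Str.len current then (st.1 ++ [current], none) else (st.1, some current)

def coalesce_small_chunks_alt (chunks : List String) (min_size : Int) : List String :=
  let st := chunks.foldl (pvStepB min_size) ([], none)
  match st.2 with
  | none => st.1
  | some c => st.1 ++ [c]

-- ===== PRECONDITION & SPEC =====
def Spec_coalesce_small_chunks (chunks : List String) (min_size : Int) (out : List String) : Prop := out = coalesce_small_chunks_alt chunks min_size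
instance (chunks : List String) (min_size : Int) (out : List String) : Decidable (Spec_coalesce_small_chunks chunks min_size out) := by unfold Spec_coalesce_small_chunks; infer_instance

-- ===== CLAIM (what is proved, stated in full; the proofs are below) =====
def Claim_equal_coalesce_small_chunks : Prop := ∀ (chunks : List String) (min_size : Int), Dom_coalesce_small_chunks chunks min_size → Spec_coalesce_small_chunks chunks min_size (coalesce_small_chunks chunks min_size)

-- ===== LEMMAS AND PROOFS =====

-- list-structured reference: the inner merge loop over the remaining suffix
def pvInner (m : Int) (acc : String) (rest : List String) : String × List String :=
  match rest with
  | [] => (acc, [])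
  | h :: t =>
    if PySem.Str.len acc < m then
      pvInner m (PySem.Str.rstrip acc ++ "\n\n" ++ PySem.Str.lstrip h) t
    else (acc, h :: t)

theorem pvInner_len_le (m : Int) :
    ∀ (rest : List String) (acc : String), (pvInner m acc rest).2.length ≤ rest.length := by
  intro rest
  induction rest with
  | nil => intro acc; simp [pvInner]
  | cons h t ih =>
    intro acc
    simp only [pvInner]
    split
    · exact le_trans (ih _) (by simp)
    · simp

def pvG (m : Int) : List String → List String
  | [] => []
  | c :: rest =>
    let p := pvInner m c rest
    p.1 :: pvG m p.2
termination_by l => l.length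
decreasing_by
  have := pvInner_len_le m rest c
  simp only [List.length_cons]; omega

theorem pvInner_stop (m : Int) (acc : String) (rest : List String)
    (h : ¬ PySem.Str.len acc < m) : pvInner m acc rest = (acc, rest) := by
  cases rest with
  | nil => rfl
  | cons a t => simp only [pvInner]; rw [if_neg h]

-- A's inner loop computes pvInner on the suffix
theorem pvInnerA_eq (chunks : List String) (m : Int) :
    ∀ (rest : List String) (acc : String) (j : Nat), j ≤ chunks.length →
      chunks.drop j = rest →
      ∃ j', pvInnerA chunks m acc j = ((pvInner m acc rest).1, j') ∧
        j' ≤ chunks.length ∧ chunks.drop j' = (pvInner m acc rest).2 := by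
  intro rest
  induction rest with
  | nil =>
    intro acc j hj hd
    have hjl : chunks.length ≤ j := List.drop_eq_nil_iff.mp hd
    refine ⟨j, ?_, hj, hd⟩
    rw [pvInnerA, dif_neg (by omega)]; rfl
  | cons h t ih =>
    intro acc j hj hd
    have hjl : j < chunks.length := by
      by_contra hc
      have : chunks.drop j = [] := List.drop_eq_nil_iff.mpr (by omega)
      simp [this] at hd
    have hget : chunks[j]'hjl = h := by
      have := List.drop_eq_getElem_cons hjl
      rw [hd] at this; exact (List.cons.injEq _ _ _ _ ▸ this).1.symm
    have hdrop : chunks.drop (j + 1) = t := by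
      have := List.drop_eq_getElem_cons hjl
      rw [hd] at this
      have := (List.cons.injEq _ _ _ _ ▸ this).2
      exact this.symm
    by_cases hs : PySem.Str.len acc < m
    · rw [pvInnerA, dif_pos ⟨hs, hjl⟩]
      simp only [pvInner, if_pos hs, hget]
      exact ih _ (j + 1) (by omega) hdrop
    · rw [pvInnerA, dif_neg (by tauto)]
      rw [pvInner_stop m acc _ hs]
      exact ⟨j, rfl, hj, hd⟩

-- A's outer loop computes pvG on the suffix
theorem pvOuterA_eq (chunks : List String) (m : Int) :
    ∀ (n : Nat) (rest : List String), rest.length ≤ n →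
      ∀ (j : Nat) (merged : List String), j ≤ chunks.length → chunks.drop j = rest →
      pvOuterA chunks m j merged = merged ++ pvG m rest := by
  intro n
  induction n with
  | zero =>
    intro rest hn j merged hj hd
    have : rest = [] := List.length_eq_zero_iff.mp (by omega)
    subst this
    have : chunks.length ≤ j := List.drop_eq_nil_iff.mp hd
    rw [pvOuterA, dif_neg (by omega), pvG]; simp
  | succ n ih =>
    intro rest hn j merged hj hd
    cases rest with
    | nil =>
      have : chunks.length ≤ j := List.drop_eq_nil_iff.mp hd
      rw [pvOuterA, dif_neg (by omega), pvG]; simp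
    | cons c t =>
      have hjl : j < chunks.length := by
        by_contra hc
        have : chunks.drop j = [] := List.drop_eq_nil_iff.mpr (by omega)
        simp [this] at hd
      have hget : chunks[j]'hjl = c := by
        have := List.drop_eq_getElem_cons hjl
        rw [hd] at this; exact (List.cons.injEq _ _ _ _ ▸ this).1.symm
      have hdrop : chunks.drop (j + 1) = t := by
        have := List.drop_eq_getElem_cons hjl
        rw [hd] at this
        exact ((List.cons.injEq _ _ _ _ ▸ this).2).symm
      rw [pvOuterA, dif_pos hjl]
      simp only [hget]
      obtain ⟨j', hA, hj', hd'⟩ := pvInnerA_eq chunks m t c (j + 1) (by omega) hdrop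
      rw [hA]
      have hlen : (pvInner m c t).2.length ≤ t.length := pvInner_len_le m t c
      rw [ih _ (by simp at hn ⊢; omega) j' (merged ++ [(pvInner m c t).1]) hj' hd']
      rw [pvG]
      simp

theorem coalesce_eq_pvG (chunks : List String) (m : Int) :
    coalesce_small_chunks chunks m = pvG m chunks := by
  by_cases h : chunks = []
  · subst h; simp [coalesce_small_chunks, pvG]
  · unfold coalesce_small_chunks
    rw [if_neg h]
    simpa using pvOuterA_eq chunks m chunks.length chunks le_rfl 0 [] (by omega) rfl

-- B's fold computes pvG
def pvFin (st : List String × Option String) : List String :=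
  match st.2 with
  | none => st.1
  | some c => st.1 ++ [c]

theorem pvStepB_none (m : Int) (res : List String) (chunk : String) :
    pvStepB m (res, none) chunk =
      if m ≤ PySem.Str.len chunk then (res ++ [chunk], none) else (res, some chunk) := rfl

theorem pvStepB_some (m : Int) (res : List String) (c chunk : String) :
    pvStepB m (res, some c) chunk =
      if m ≤ PySem.Str.len (PySem.Str.rstrip c ++ "\n\n" ++ PySem.Str.lstrip chunk) then
        (res ++ [PySem.Str.rstrip c ++ "\n\n" ++ PySem.Str.lstrip chunk], none)
      else (res, some (PySem.Str.rstrip c ++ "\n\n" ++ PySem.Str.lstrip chunk)) := rfl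

theorem foldB_eq (m : Int) :
    ∀ (n : Nat) (rest : List String), rest.length ≤ n →
      (∀ res : List String,
        pvFin (rest.foldl (pvStepB m) (res, none)) = res ++ pvG m rest) ∧
      (∀ (res : List String) (c : String), PySem.Str.len c < m →
        pvFin (rest.foldl (pvStepB m) (res, some c)) =
          res ++ (pvInner m c rest).1 :: pvG m (pvInner m c rest).2) := by
  intro n
  induction n with
  | zero =>
    intro rest hn
    have : rest = [] := List.length_eq_zero_iff.mp (by omega)
    subst this
    constructor
    · intro res; simp [pvFin, pvG]
    · intro res c _; simp [pvFin, pvInner, pvG]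
  | succ n ih =>
    intro rest hn
    cases rest with
    | nil =>
      constructor
      · intro res; simp [pvFin, pvG]
      · intro res c _; simp [pvFin, pvInner, pvG]
    | cons h t =>
      have ht : t.length ≤ n := by simp at hn; omega
      constructor
      · intro res
        rw [List.foldl_cons, pvStepB_none]
        by_cases hs : m ≤ PySem.Str.len h
        · rw [if_pos hs]
          rw [(ih t ht).1 (res ++ [h])]
          rw [pvG]
          rw [pvInner_stop m h t (by omega)]
          simp
        · rw [if_neg hs]
          rw [(ih t ht).2 res h (by omega)]
          rw [pvG]
      · intro res c hc
        rw [List.foldl_cons, pvStepB_some]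
        have hInner : pvInner m c (h :: t) =
            pvInner m (PySem.Str.rstrip c ++ "\n\n" ++ PySem.Str.lstrip h) t := by
          simp only [pvInner]; rw [if_pos hc]
        by_cases hs : m ≤ PySem.Str.len (PySem.Str.rstrip c ++ "\n\n" ++ PySem.Str.lstrip h)
        · rw [if_pos hs]
          rw [(ih t ht).1 (res ++ [PySem.Str.rstrip c ++ "\n\n" ++ PySem.Str.lstrip h])]
          rw [hInner, pvInner_stop m _ t (by omega)]
          simp
        · rw [if_neg hs]
          rw [(ih t ht).2 res _ (by omega)]
          rw [hInner]

theorem alt_eq_pvG (chunks : List String) (m : Int) :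
    coalesce_small_chunks_alt chunks m = pvG m chunks := by
  have := (foldB_eq m chunks.length chunks le_rfl).1 []
  unfold coalesce_small_chunks_alt
  simpa [pvFin] using this

-- ===== VERDICT (by name: the statement is the Claim_ definition above) =====
theorem coalesce_small_chunks_spec : Claim_equal_coalesce_small_chunks := by
  intro chunks min_size _
  unfold Spec_coalesce_small_chunks
  rw [coalesce_eq_pvG, alt_eq_pvG]
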